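-- pv_equiv track=rewrite | github.com/m1tkd23-lang/mt4-python-bridge_rev1 | src/mt4_bridge/strategies/bollinger_trend_B3_weak_start.py | _extract_entry_progress_bar_count
-- ===== SOURCE A (Python) =====
-- def _extract_entry_progress_bar_count(comment: str | None) -> int | None:
--     if not comment:
--         return None
--
--     marker = "entry_bar_index="
--     index = comment.find(marker)
--     if index < 0:
--         return None
--
--     start = index + len(marker)
--     end = start
--     while end < len(comment) and comment[end].isdigit():
--         end += 1
--
--     raw_value = comment[start:end]
--     if not raw_value:
--         return None
--
--     try:
--         return int(raw_value)
--     except ValueError: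
--         return None
-- ===== SOURCE B (Python) =====
-- _MARKER = "entry_bar_index="
-- # KMP failure table for _MARKER (fail[j] = length of the longest proper border
-- # of _MARKER[:j]); only the prefix "entry_bar_inde" has a border ("e").
-- _FAIL = (0, 0, 0, 0, 0, 0, 0, 0, 0, 0, 0, 0, 0, 0, 1, 0, 0)
--
--
-- def _extract_entry_progress_bar_count(comment):
--     if not comment:
--         return None
--     j = 0  # automaton state: chars of _MARKER matched so far (16 = found)
--     acc = None  # running integer value of the digit run after the marker
--     for c in comment:
--         if j == 16:
--             if "0" <= c <= "9":
--                 acc = (0 if acc is None else acc) * 10 + (ord(c) - 48)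
--             else:
--                 return acc
--         else:
--             while j > 0 and c != _MARKER[j]:
--                 j = _FAIL[j]
--             if c == _MARKER[j]:
--                 j += 1
--     return acc
-- ===== Notes on version B (the rewrite author's own statement) =====
-- stated objective: alternative
-- what changed: Replaces find + slicing + int() with a single left-to-right pass of a KMP string-matching automaton (hardcoded failure table) that, once the marker is fully matched, folds the following digit run directly into an integer accumulator; no substring search primitive, no slice and no int() parse remain.
import Mathlib
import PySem

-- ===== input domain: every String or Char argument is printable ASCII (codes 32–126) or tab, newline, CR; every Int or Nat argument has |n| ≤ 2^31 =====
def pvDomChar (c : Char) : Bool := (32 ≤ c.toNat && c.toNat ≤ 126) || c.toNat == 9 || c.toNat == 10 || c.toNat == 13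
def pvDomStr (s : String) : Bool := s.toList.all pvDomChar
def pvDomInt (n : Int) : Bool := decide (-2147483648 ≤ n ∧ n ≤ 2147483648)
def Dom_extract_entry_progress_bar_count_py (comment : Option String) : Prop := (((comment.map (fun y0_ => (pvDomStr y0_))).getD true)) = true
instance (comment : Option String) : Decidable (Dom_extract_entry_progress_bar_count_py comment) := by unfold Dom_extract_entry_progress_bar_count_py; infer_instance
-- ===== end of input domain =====

-- B replaces A's find-the-marker / slice / int() pipeline by a single left-to-right pass
-- of a KMP string-matching automaton (hardcoded failure table) that folds the digit run
-- following the marker directly into an integer accumulator (alternative; same cost).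

-- ===== PORT A =====
-- base-10 value of a run of ASCII digits: A's `int(raw_value)` is exactly this left
-- fold because raw_value is a nonempty run of the characters 0-9 (hand-ported here,
-- exact on that input; the try/except ValueError branch of A is unreachable)
def pvDigitsVal (cs : List Char) : Int :=
  cs.foldl (fun a c => a * 10 + ((c.toNat : Int) - 48)) 0

-- A's while loop: 'while end < len(comment) and comment[end].isdigit(): end += 1'
def pvAScan (cs : List Char) (e : Nat) : Nat :=
  if h : e < cs.length then
    if PySem.Chars.isdigit cs[e] then pvAScan cs (e + 1) else e
  else e
termination_by cs.length - e

def extract_entry_progress_bar_count_py (comment : Option String) : Option Int :=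
  match comment with
  | none => none
  | some s =>
    let cs := s.toList
    if cs = [] then none else           -- 'if not comment'
    let marker := "entry_bar_index=".toList
    let index := PySem.Chars.find cs marker
    if index < 0 then none else
    let start := index + (marker.length : Int)
    let e := pvAScan cs start.toNat
    let raw := PySem.List.slice cs (some start) (some (e : Int))
    if raw = [] then none else
    some (pvDigitsVal raw)              -- 'return int(raw_value)' (see pvDigitsVal)

-- ===== PORT B =====
def pvMarker : List Char := "entry_bar_index=".toList

-- the _FAIL tuple of Source B
def pvFailTbl : List Nat := [0, 0, 0, 0, 0, 0, 0, 0, 0, 0, 0, 0, 0, 0, 1, 0, 0]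

def pvFail (j : Nat) : Nat := pvFailTbl.getD j 0

-- needed by pvFallLoop's termination
theorem pvFail_lt (j : Nat) (h : 0 < j) : pvFail j < j := by
  by_cases h17 : j < 17
  · interval_cases j <;> decide
  · have h0 : pvFail j = 0 := by
      unfold pvFail
      exact List.getD_eq_default _ _ (by simp [pvFailTbl]; omega)
    omega

-- 'while j > 0 and c != _MARKER[j]: j = _FAIL[j]'
def pvFallLoop (c : Char) (j : Nat) : Nat :=
  if hj : 0 < j ∧ c ≠ pvMarker.getD j ' ' then pvFallLoop c (pvFail j) else j
termination_by j
decreasing_by exact pvFail_lt j hj.1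

-- the fallback loop followed by 'if c == _MARKER[j]: j += 1'
def pvFall (c : Char) (j : Nat) : Nat :=
  let j2 := pvFallLoop c j
  if c = pvMarker.getD j2 ' ' then j2 + 1 else j2

-- the 'for c in comment' loop of Source B: state j (marker chars matched; 16 = found) and acc
def pvBScan : List Char → Nat → Option Int → Option Int
  | [], _, acc => acc
  | c :: rest, j, acc =>
    if j = 16 then
      if '0' ≤ c ∧ c ≤ '9' then
        pvBScan rest j (some (acc.getD 0 * 10 + ((c.toNat : Int) - 48)))
      else acc
    else pvBScan rest (pvFall c j) acc

def extract_entry_progress_bar_count_py_alt (comment : Option String) : Option Int :=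
  match comment with
  | none => none
  | some s =>
    if s.toList = [] then none else     -- 'if not comment'
    pvBScan s.toList 0 none

-- ===== PRECONDITION & SPEC =====
def Spec_extract_entry_progress_bar_count_py (comment : Option String) (out : Option Int) : Prop := out = extract_entry_progress_bar_count_py_alt comment
instance (comment : Option String) (out : Option Int) : Decidable (Spec_extract_entry_progress_bar_count_py comment out) := by unfold Spec_extract_entry_progress_bar_count_py; infer_instance

-- ===== CLAIM (what is proved, stated in full; the proofs are below) =====
def Claim_equal_extract_entry_progress_bar_count_py : Prop := ∀ (comment : Option String), Dom_extract_entry_progress_bar_count_py comment → Spec_extract_entry_progress_bar_count_py comment (extract_entry_progress_bar_count_py comment)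

-- ===== LEMMAS AND PROOFS =====

-- canonical form of A: first occurrence of the marker, then the digit phase
def pvDPhase (t : List Char) : Option Int :=
  if t.takeWhile PySem.Chars.isdigit = [] then none
  else some (pvDigitsVal (t.takeWhile PySem.Chars.isdigit))

def pvACanon (t : List Char) : Option Int :=
  if PySem.Chars.find t pvMarker < 0 then none
  else pvDPhase (t.drop ((PySem.Chars.find t pvMarker).toNat + 16))

theorem pvMarker_len : pvMarker.length = 16 := by decide

-- A's scan loop stops exactly after the maximal digit run starting at e
theorem pvAScan_eq (cs : List Char) (e : Nat) :
    pvAScan cs e = e + ((cs.drop e).takeWhile PySem.Chars.isdigit).length := by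
  fun_induction pvAScan cs e with
  | case1 e h hd ih =>
      rw [ih, List.drop_eq_getElem_cons h, List.takeWhile_cons_of_pos hd]
      simp; omega
  | case2 e h hd =>
      rw [List.drop_eq_getElem_cons h, List.takeWhile_cons_of_neg (by simp [hd])]
      simp
  | case3 e h =>
      rw [List.drop_eq_nil_of_le (by omega)]; simp

-- Python's `'0' <= c <= '9'` is exactly str.isdigit on chars
theorem pvIsdigit_iff (c : Char) : PySem.Chars.isdigit c = true ↔ ('0' ≤ c ∧ c ≤ '9') := by
  show ((decide ('0' ≤ c) && decide (c ≤ '9')) = true) ↔ _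
  simp

-- B's loop in the found state accumulates exactly the maximal digit run
theorem pvBScan16 (t : List Char) (acc : Option Int) :
    pvBScan t 16 acc =
      (if t.takeWhile PySem.Chars.isdigit = [] then acc
       else some ((t.takeWhile PySem.Chars.isdigit).foldl
         (fun a c => a * 10 + ((c.toNat : Int) - 48)) (acc.getD 0))) := by
  induction t generalizing acc with
  | nil => simp [pvBScan]
  | cons c rest ih =>
    by_cases hd : ('0' ≤ c ∧ c ≤ '9')
    · have hdig : PySem.Chars.isdigit c = true := (pvIsdigit_iff c).mpr hd
      rw [List.takeWhile_cons_of_pos hdig]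
      simp only [pvBScan, if_pos hd]
      rw [ih]
      by_cases h2 : rest.takeWhile PySem.Chars.isdigit = []
      · simp [h2]
      · simp [h2]
    · have hdig : ¬ (PySem.Chars.isdigit c = true) := fun h => hd ((pvIsdigit_iff c).mp h)
      rw [List.takeWhile_cons_of_neg (by simpa using hdig)]
      simp [pvBScan, hd]

theorem pvDPhase_eq_scan (t : List Char) : pvBScan t 16 none = pvDPhase t := by
  rw [pvBScan16]; simp [pvDPhase, pvDigitsVal]

-- if the marker cannot start at the head, dropping the head char keeps A's answer
theorem pvCanon_cons (c : Char) (t : List Char) (h : ¬ pvMarker <+: c :: t) :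
    pvACanon (c :: t) = pvACanon t := by
  by_cases hinf : pvMarker <:+: t
  · have hne : PySem.Chars.find t pvMarker ≠ -1 := (PySem.Chars.find_ne_neg_one_iff _ _).mpr hinf
    have h0 : 0 ≤ PySem.Chars.find t pvMarker := by
      have := PySem.Chars.neg_one_le_find t pvMarker; omega
    obtain ⟨hocc, hmin⟩ := PySem.Chars.find_spec h0
    have hinf2 : pvMarker <:+: c :: t := hinf.trans (List.suffix_cons c t).isInfix
    have hne' : PySem.Chars.find (c :: t) pvMarker ≠ -1 := (PySem.Chars.find_ne_neg_one_iff _ _).mpr hinf2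
    have h0' : 0 ≤ PySem.Chars.find (c :: t) pvMarker := by
      have := PySem.Chars.neg_one_le_find (c :: t) pvMarker; omega
    obtain ⟨hocc', hmin'⟩ := PySem.Chars.find_spec h0'
    have hk : (PySem.Chars.find (c :: t) pvMarker).toNat
        = (PySem.Chars.find t pvMarker).toNat + 1 := by
      have hane : (PySem.Chars.find (c :: t) pvMarker).toNat ≠ 0 := by
        intro h0a
        exact h (by simpa [h0a] using hocc')
      obtain ⟨a', ha'⟩ : ∃ a', (PySem.Chars.find (c :: t) pvMarker).toNat = a' + 1 :=
        ⟨(PySem.Chars.find (c :: t) pvMarker).toNat - 1, by omega⟩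
      rw [ha'] at hocc' hmin'
      have hocc2 : pvMarker <+: t.drop a' := by simp at hocc'; exact hocc'
      have hba : (PySem.Chars.find t pvMarker).toNat ≤ a' := by
        by_contra hlt
        exact (hmin a' (by omega)) hocc2
      have hab : a' ≤ (PySem.Chars.find t pvMarker).toNat := by
        by_contra hlt
        exact (hmin' ((PySem.Chars.find t pvMarker).toNat + 1) (by omega)) (by simpa using hocc)
      omega
    unfold pvACanon
    rw [if_neg (by omega), if_neg (by omega), hk]
    have hplus : ((PySem.Chars.find t pvMarker).toNat + 1 + 16)
        = ((PySem.Chars.find t pvMarker).toNat + 16) + 1 := by omega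
    rw [hplus, List.drop_succ_cons]
  · have hinf2 : ¬ pvMarker <:+: c :: t := by
      intro hinf2
      obtain ⟨i, hi⟩ := (PySem.Chars.exists_prefix_drop_iff_isIn pvMarker (c :: t)).mpr
        ((PySem.Chars.isIn_iff_infix pvMarker (c :: t)).mpr hinf2)
      cases i with
      | zero => exact h (by simpa using hi)
      | succ i =>
        have hi' : pvMarker <+: t.drop i := by simpa using hi
        exact hinf (hi'.isInfix.trans (List.drop_suffix i t).isInfix)
    unfold pvACanon
    rw [(PySem.Chars.find_eq_neg_one_iff _ _).mpr hinf, (PySem.Chars.find_eq_neg_one_iff _ _).mpr hinf2]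
    simp

theorem pvFind_self_append (rest : List Char) :
    PySem.Chars.find (pvMarker ++ rest) pvMarker = 0 := by
  have hocc0 : pvMarker <+: (pvMarker ++ rest).drop 0 := by
    rw [List.drop_zero]; exact List.prefix_append pvMarker rest
  have hinf : pvMarker <:+: pvMarker ++ rest := (List.prefix_append pvMarker rest).isInfix
  have hne : PySem.Chars.find (pvMarker ++ rest) pvMarker ≠ -1 :=
    (PySem.Chars.find_ne_neg_one_iff _ _).mpr hinf
  have h0 : 0 ≤ PySem.Chars.find (pvMarker ++ rest) pvMarker := by
    have := PySem.Chars.neg_one_le_find (pvMarker ++ rest) pvMarker; omega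
  obtain ⟨hocc, hmin⟩ := PySem.Chars.find_spec h0
  have hz : (PySem.Chars.find (pvMarker ++ rest) pvMarker).toNat = 0 := by
    by_contra hne0
    exact (hmin 0 (by omega)) hocc0
  omega

-- the marker is a prefix of s ++ c :: rest (|s| = k < 16) only if s is the length-k
-- marker prefix and c the next marker char
theorem pvNoPref (s : List Char) (k : Nat) (c : Char) (rest : List Char)
    (hk : s.length = k) (hlt : k < 16)
    (h : ¬ (s = pvMarker.take k ∧ c = pvMarker.getD k ' ')) :
    ¬ pvMarker <+: (s ++ c :: rest) := by
  intro hp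
  have h1 : s ++ [c] <+: s ++ c :: rest := ⟨rest, by simp⟩
  have h2 : s ++ [c] <+: pvMarker :=
    List.prefix_of_prefix_length_le h1 hp (by simp [pvMarker_len]; omega)
  have h3 : s ++ [c] = pvMarker.take (k + 1) := by
    have := List.prefix_iff_eq_take.mp h2
    simpa [hk] using this
  rw [List.take_add_one] at h3
  have hgetq : pvMarker[k]? = some (pvMarker.getD k ' ') := by
    rw [List.getElem?_eq_getElem (by rw [pvMarker_len]; omega),
        List.getD_eq_getElem _ _ (by rw [pvMarker_len]; omega)]
  rw [hgetq] at h3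
  obtain ⟨hA, hB⟩ := List.append_inj h3 (by simp [hk, pvMarker_len]; omega)
  simp at hB
  exact h ⟨hA, hB⟩

-- no prefix of the marker of length < 16 has a nonempty border, except "entry_bar_inde"
theorem pvNoBorder : ∀ j < 16, ∀ p < j, 0 < p →
    (pvMarker.take j).drop p = pvMarker.take (j - p) → (j = 14 ∧ p = 13) := by decide

-- "no marker occurrence starts at position p of (matched prefix j) ++ c :: cs'"
theorem pvNoOcc (j p : Nat) (c : Char) (cs' : List Char) (hj : j ≤ 15) (hp : p ≤ j)
    (h2 : c ≠ pvMarker.getD (j - p) ' ' ∨ (0 < p ∧ p < j ∧ ¬(j = 14 ∧ p = 13))) :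
    ¬ pvMarker <+: (pvMarker.take j ++ c :: cs').drop p := by
  have hlen : (pvMarker.take j).length = j := by rw [List.length_take, pvMarker_len]; omega
  rw [List.drop_append_of_le_length (by omega)]
  apply pvNoPref _ (j - p) c cs' (by rw [List.length_drop, hlen]) (by omega)
  rintro ⟨hb1, hb2⟩
  rcases h2 with hne | ⟨hpos, hplt, hnot⟩
  · exact hne hb2
  · exact hnot (pvNoBorder j (by omega) p hplt hpos hb1)

-- strip k head chars off the text when no marker occurrence starts among them
theorem pvStripK (k : Nat) : ∀ (t : List Char),
    (∀ p < k, ¬ pvMarker <+: t.drop p) → pvACanon t = pvACanon (t.drop k) := by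
  induction k with
  | zero => intro t _; simp
  | succ k ih =>
    intro t h
    cases t with
    | nil => simp
    | cons a t' =>
      rw [pvCanon_cons a t' (by simpa using h 0 (by omega)), List.drop_succ_cons]
      exact ih t' (fun p hp => by simpa using h (p + 1) (by omega))

theorem pvFail_eq_zero (j : Nat) (hj : j < 16) (hne : j ≠ 14) : pvFail j = 0 := by
  interval_cases j <;> first | rfl | omega

theorem pvFallLoop_zero (c : Char) : pvFallLoop c 0 = 0 := by
  rw [pvFallLoop]; simp

theorem pvDropAll (j k : Nat) (hj : j ≤ 16) (l : List Char) :
    (pvMarker.take j ++ l).drop (j + k) = l.drop k := by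
  have hlen : (pvMarker.take j).length = j := by rw [List.length_take, pvMarker_len]; omega
  have h1 : (pvMarker.take j).drop (j + k) = [] := List.drop_eq_nil_of_le (by rw [hlen]; omega)
  rw [List.drop_append, h1, hlen, Nat.add_sub_cancel_left, List.nil_append]

-- main loop invariant: in state j, B's remaining scan computes A's canonical answer
-- on (matched marker prefix of length j) ++ (remaining text)
theorem pvMain (cs : List Char) : ∀ (j : Nat), j ≤ 15 →
    pvBScan cs j none = pvACanon (pvMarker.take j ++ cs) := by
  induction cs with
  | nil =>
    intro j hj
    have hnot : ¬ pvMarker <:+: pvMarker.take j := by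
      intro hinf
      have := hinf.length_le
      rw [pvMarker_len, List.length_take, pvMarker_len] at this
      omega
    have hfind : PySem.Chars.find (pvMarker.take j) pvMarker = -1 :=
      (PySem.Chars.find_eq_neg_one_iff _ _).mpr hnot
    simp [pvBScan, pvACanon, hfind]
  | cons c cs' ih =>
    intro j hj
    have hj16 : ¬ (j = 16) := by omega
    have hstep : pvBScan (c :: cs') j none = pvBScan cs' (pvFall c j) none := by
      simp [pvBScan, hj16]
    rw [hstep]
    by_cases hc : c = pvMarker.getD j ' '
    · -- match: advance the automaton
      have hloop : pvFallLoop c j = j := by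
        rw [pvFallLoop]; simp [hc]
      have hfall : pvFall c j = j + 1 := by
        unfold pvFall
        rw [hloop, if_pos hc]
      rw [hfall]
      by_cases hj15 : j = 15
      · subst hj15
        have hlist : pvMarker.take 15 ++ c :: cs' = pvMarker ++ cs' := by
          rw [hc]; rfl
        rw [hlist, pvDPhase_eq_scan]
        unfold pvACanon
        rw [pvFind_self_append]
        have hdrop : (pvMarker ++ cs').drop 16 = cs' := by
          have h := @List.drop_left _ pvMarker cs'
          rwa [pvMarker_len] at h
        simp [hdrop]
      · have hlist : pvMarker.take j ++ c :: cs' = pvMarker.take (j + 1) ++ cs' := by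
          have hjlen : j < pvMarker.length := by rw [pvMarker_len]; omega
          have h1 : pvMarker.take (j + 1) = pvMarker.take j ++ [pvMarker.getD j ' '] := by
            rw [List.take_add_one, List.getElem?_eq_getElem hjlen,
                List.getD_eq_getElem _ _ hjlen]
            rfl
          rw [h1, List.append_assoc, List.singleton_append, ← hc]
        rw [hlist]
        exact ih (j + 1) (by omega)
    · -- mismatch: fall back
      by_cases hj14 : j = 14
      · subst hj14
        by_cases hcn : c = 'n'
        · have hfall : pvFall c 14 = 2 := by
            have hl1 : pvFallLoop c 14 = 1 := by
              rw [pvFallLoop, dif_pos ⟨by omega, hc⟩,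
                  show pvFail 14 = 1 from rfl, pvFallLoop,
                  dif_neg (by rw [hcn]; decide)]
            unfold pvFall
            rw [hl1, if_pos (by rw [hcn]; rfl)]
          rw [hfall]
          have hkey : pvACanon (pvMarker.take 14 ++ c :: cs')
              = pvACanon (pvMarker.take 2 ++ cs') := by
            rw [pvStripK 13 _ (by
              intro p hp
              apply pvNoOcc 14 p c cs' (by omega) (by omega)
              rcases Nat.eq_zero_or_pos p with rfl | hpos
              · exact Or.inl (by rw [Nat.sub_zero]; exact hc)
              · exact Or.inr ⟨hpos, by omega, by omega⟩)]
            rw [List.drop_append_of_le_length (by simp [pvMarker_len]), hcn]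
            rfl
          rw [hkey]
          exact ih 2 (by omega)
        · by_cases hce : c = 'e'
          · have hfall : pvFall c 14 = 1 := by
              have hl1 : pvFallLoop c 14 = 0 := by
                rw [pvFallLoop, dif_pos ⟨by omega, hc⟩,
                    show pvFail 14 = 1 from rfl, pvFallLoop,
                    dif_pos ⟨by omega, by rw [hce]; decide⟩,
                    show pvFail 1 = 0 from rfl, pvFallLoop_zero]
              unfold pvFall
              rw [hl1, if_pos (by rw [hce]; rfl)]
            rw [hfall]
            have hkey : pvACanon (pvMarker.take 14 ++ c :: cs')
                = pvACanon (pvMarker.take 1 ++ cs') := by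
              rw [pvStripK 14 _ (by
                intro p hp
                apply pvNoOcc 14 p c cs' (by omega) (by omega)
                rcases Nat.eq_zero_or_pos p with rfl | hpos
                · exact Or.inl (by rw [Nat.sub_zero]; exact hc)
                · by_cases hp13 : p = 13
                  · subst hp13
                    exact Or.inl (by rw [hce]; decide)
                  · exact Or.inr ⟨hpos, by omega, by omega⟩)]
              rw [List.drop_append_of_le_length (by simp [pvMarker_len]), hce]
              rfl
            rw [hkey]
            exact ih 1 (by omega)
          · have hfall : pvFall c 14 = 0 := by
              have hl1 : pvFallLoop c 14 = 0 := by
                rw [pvFallLoop, dif_pos ⟨by omega, hc⟩,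
                    show pvFail 14 = 1 from rfl, pvFallLoop,
                    dif_pos ⟨by omega, by simpa using hcn⟩,
                    show pvFail 1 = 0 from rfl, pvFallLoop_zero]
              unfold pvFall
              rw [hl1, if_neg (by simpa using hce)]
            rw [hfall]
            have hkey : pvACanon (pvMarker.take 14 ++ c :: cs') = pvACanon cs' := by
              rw [pvStripK 15 _ (by
                intro p hp
                apply pvNoOcc 14 p c cs' (by omega) (by omega)
                rcases Nat.eq_zero_or_pos p with rfl | hpos
                · exact Or.inl (by rw [Nat.sub_zero]; exact hc)
                · by_cases hp13 : p = 13
                  · subst hp13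
                    exact Or.inl (by intro h; exact hcn (by rw [h]; decide))
                  · by_cases hp14 : p = 14
                    · subst hp14
                      exact Or.inl (by rw [Nat.sub_self]; intro h; exact hce (by rw [h]; decide))
                    · exact Or.inr ⟨hpos, by omega, by omega⟩)]
              have hd := pvDropAll 14 1 (by omega) (c :: cs')
              rw [show (15 : Nat) = 14 + 1 from rfl, hd]
              rfl
            rw [hkey]
            have h0 := ih 0 (by omega)
            simpa using h0
      · -- j ≠ 14
        by_cases hce : c = 'e'
        · have hj0 : j ≠ 0 := by
            rintro rfl; exact hc (by rw [hce]; rfl)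
          have hfall : pvFall c j = 1 := by
            have hl : pvFallLoop c j = 0 := by
              rw [pvFallLoop, dif_pos ⟨by omega, hc⟩,
                  pvFail_eq_zero j (by omega) hj14, pvFallLoop_zero]
            unfold pvFall
            rw [hl, if_pos (by rw [hce]; rfl)]
          rw [hfall]
          have hkey : pvACanon (pvMarker.take j ++ c :: cs')
              = pvACanon (pvMarker.take 1 ++ cs') := by
            rw [pvStripK j _ (by
              intro p hp
              apply pvNoOcc j p c cs' (by omega) (by omega)
              rcases Nat.eq_zero_or_pos p with rfl | hpos
              · exact Or.inl (by rw [Nat.sub_zero]; exact hc)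
              · exact Or.inr ⟨hpos, by omega, by omega⟩)]
            have hd := pvDropAll j 0 (by omega) (c :: cs')
            rw [Nat.add_zero] at hd
            rw [hd, List.drop_zero, hce]
            rfl
          rw [hkey]
          exact ih 1 (by omega)
        · have hfall : pvFall c j = 0 := by
            have hl : pvFallLoop c j = 0 := by
              rcases Nat.eq_zero_or_pos j with rfl | hjpos
              · exact pvFallLoop_zero c
              · rw [pvFallLoop, dif_pos ⟨hjpos, hc⟩,
                    pvFail_eq_zero j (by omega) hj14, pvFallLoop_zero]
            unfold pvFall
            rw [hl, if_neg (by simpa using hce)]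
          rw [hfall]
          have hkey : pvACanon (pvMarker.take j ++ c :: cs') = pvACanon cs' := by
            rw [pvStripK (j + 1) _ (by
              intro p hp
              apply pvNoOcc j p c cs' (by omega) (by omega)
              rcases Nat.eq_zero_or_pos p with rfl | hpos
              · rcases Nat.eq_zero_or_pos j with rfl | hjpos
                · exact Or.inl (by intro h; exact hce (by rw [h]; decide))
                · exact Or.inl (by rw [Nat.sub_zero]; exact hc)
              · by_cases hpj : p = j
                · subst hpj
                  exact Or.inl (by rw [Nat.sub_self]; intro h; exact hce (by rw [h]; decide))
                · exact Or.inr ⟨hpos, by omega, by omega⟩)]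
            have hd := pvDropAll j 1 (by omega) (c :: cs')
            rw [hd, List.drop_succ_cons, List.drop_zero]
          rw [hkey]
          have h0 := ih 0 (by omega)
          simpa using h0

-- A's port equals its canonical form
theorem pvA_eq_canon (s : String) :
    extract_entry_progress_bar_count_py (some s) = pvACanon s.toList := by
  simp only [extract_entry_progress_bar_count_py]
  set cs := s.toList with hcs
  by_cases hnil : cs = []
  · rw [if_pos hnil]
    have hnot : ¬ pvMarker <:+: cs := by
      rw [hnil]; intro hinf
      have := hinf.length_le
      rw [pvMarker_len] at this
      simp at this
    unfold pvACanon
    rw [(PySem.Chars.find_eq_neg_one_iff _ _).mpr hnot]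
    simp
  · rw [if_neg hnil]
    have hmk : "entry_bar_index=".toList = pvMarker := rfl
    rw [hmk]
    set i := PySem.Chars.find cs pvMarker with hi
    by_cases hneg : i < 0
    · unfold pvACanon
      rw [← hi]
      simp [hneg]
    · simp only [if_neg hneg]
      rw [not_lt] at hneg
      simp only [pvMarker_len, Nat.cast_ofNat]
      have hstart : (i + (16 : Int)).toNat = i.toNat + 16 := by omega
      set rest := cs.drop (i.toNat + 16) with hrest
      have hscan := pvAScan_eq cs (i.toNat + 16)
      set tw := rest.takeWhile PySem.Chars.isdigit with htw
      have hraw : PySem.List.slice cs (some (i + (16 : Int)))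
          (some ((pvAScan cs (i + (16 : Int)).toNat : Nat) : Int)) = tw := by
        rw [hstart, hscan]
        rw [PySem.List.slice_toNat]
        case ha => omega
        case hb => exact Int.natCast_nonneg _
        have h1 : ((((i.toNat + 16) + tw.length : Nat) : Int)).toNat = i.toNat + 16 + tw.length := by
          omega
        rw [h1, hstart]
        have h2 : i.toNat + 16 + tw.length - (i.toNat + 16) = tw.length := by omega
        rw [h2, ← hrest]
        exact ((List.prefix_iff_eq_take.mp (List.takeWhile_prefix _)).symm)
      rw [hstart] at hraw ⊢
      rw [hraw]
      unfold pvACanon pvDPhase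
      rw [← hi, if_neg (not_lt.mpr hneg)]

theorem pvPorts_agree (comment : Option String) :
    extract_entry_progress_bar_count_py comment = extract_entry_progress_bar_count_py_alt comment := by
  cases comment with
  | none => rfl
  | some s =>
    rw [pvA_eq_canon]
    simp only [extract_entry_progress_bar_count_py_alt]
    by_cases hnil : s.toList = []
    · rw [if_pos hnil, hnil]
      have hnot : ¬ pvMarker <:+: ([] : List Char) := by
        intro hinf
        have := hinf.length_le
        rw [pvMarker_len] at this
        simp at this
      unfold pvACanon
      rw [(PySem.Chars.find_eq_neg_one_iff _ _).mpr hnot]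
      simp
    · rw [if_neg hnil, pvMain s.toList 0 (by omega)]
      simp

-- ===== VERDICT (by name: the statement is the Claim_ definition above) =====
theorem extract_entry_progress_bar_count_py_spec : Claim_equal_extract_entry_progress_bar_count_py := by
  intro comment _
  unfold Spec_extract_entry_progress_bar_count_py
  exact pvPorts_agree comment
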